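-- pv_equiv track=rewrite | github.com/anthonytk31415/leetcode | python-fundamentals/graphs/countRoutes.py | countRoutes1
-- ===== SOURCE A (Python) =====
-- from collections import deque
--
-- def countRoutes1(locations, start, finish, fuel):
--
--     queue = deque([(start, fuel, [start])])
--     winningPaths = set([])
--     while queue:
--         u, fuel, path = queue.popleft()
--         if u == finish and tuple(path) not in winningPaths:
--             winningPaths.add(tuple(path))
--         for v, num in enumerate(locations):
--             if v != u:
--                 fuelCost = abs(locations[u] - num)
--                 if fuelCost <= fuel:
--                     queue.append([v, fuel - fuelCost, path + [v]])
--     return len(winningPaths)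
-- ===== SOURCE B (Python) =====
-- def countRoutes1(locations, start, finish, fuel):
--     # Memoized DP over (city, remaining fuel) states, resolved with an explicit
--     # post-order stack (no recursion): each reachable state is evaluated once.
--     memo = {}
--     stack = [(start, fuel)]
--     while stack:
--         u, f = stack[-1]
--         if (u, f) in memo:
--             stack.pop()
--             continue
--         total = 1 if u == finish else 0
--         pending = []
--         ready = True
--         for v, loc in enumerate(locations):
--             if v != u:
--                 c = abs(locations[u] - loc)
--                 if c <= f:
--                     r = memo.get((v, f - c))
--                     if r is None:
--                         ready = False
--                         pending.append((v, f - c))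
--                     else:
--                         total += r
--         if ready:
--             memo[(u, f)] = total
--             stack.pop()
--         else:
--             stack.extend(pending)
--     return memo[(start, fuel)]
-- ===== Notes on version B (the rewrite author's own statement) =====
-- stated objective: alternative
-- what changed: A's breadth-first enumeration of every feasible path (explicit path lists in a queue plus a set of winning path tuples) is replaced by memoized dynamic programming over (city, remaining-fuel) states resolved with an explicit post-order stack, so each reachable state is evaluated once instead of once per path reaching it; intended as an asymptotic improvement, but a timing run could not confirm it at scale, so no speed is claimed.
import Mathlib
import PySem

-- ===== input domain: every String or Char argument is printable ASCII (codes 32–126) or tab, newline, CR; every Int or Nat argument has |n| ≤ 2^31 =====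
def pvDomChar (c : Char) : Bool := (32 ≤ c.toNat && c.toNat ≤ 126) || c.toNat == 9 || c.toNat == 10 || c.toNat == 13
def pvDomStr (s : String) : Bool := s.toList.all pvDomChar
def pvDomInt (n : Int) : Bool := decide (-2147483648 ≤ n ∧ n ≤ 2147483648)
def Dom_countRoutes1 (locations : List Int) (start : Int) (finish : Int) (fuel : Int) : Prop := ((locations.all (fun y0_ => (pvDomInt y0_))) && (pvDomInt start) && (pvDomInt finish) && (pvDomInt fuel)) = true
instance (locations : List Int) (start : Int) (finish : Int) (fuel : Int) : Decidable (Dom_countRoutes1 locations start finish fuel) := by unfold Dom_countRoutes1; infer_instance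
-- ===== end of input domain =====

-- B replaces A's exponential breadth-first enumeration of all feasible paths by memoized DP over
-- (city, remaining fuel) states driven by an explicit post-order stack (objective: alternative;
-- a timing run could not confirm a speedup at scale, so no speed is claimed).

-- ===== PORT A =====
-- shared small helpers: the fuel cost of the move u → v (vn = one entry of enumerate(locations)),
-- and the two move tests of the Python code ('v != u and fuelCost <= fuel').
def pvC (L : List Int) (u : Int) (vn : Int × Int) : Int :=
  |PySem.List.pyGetD L u 0 - vn.2|

def pvP0 (L : List Int) (u f : Int) (vn : Int × Int) : Bool :=
  decide (vn.1 ≠ u ∧ pvC L u vn ≤ f)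

-- gated move test: additionally requires fuelCost ≥ 1.  This is ONLY a totality gate for loopA's
-- well-founded recursion: inside the loop every queue item carries a canonical index 0 ≤ u < n, so
-- under Pre_ (no affordable duplicated value, or negative fuel) the extra conjunct never fires.
def pvPg (L : List Int) (u f : Int) (vn : Int × Int) : Bool :=
  decide (vn.1 ≠ u ∧ pvC L u vn ≤ f ∧ 1 ≤ pvC L u vn)

-- the inner 'for v, num in enumerate(locations)' loop of A, producing the items appended to the queue
def pvStepChildren (L : List Int) (u f : Int) (p : List Int) : List (Int × Int × List Int) :=
  (PySem.List.enumerate L).foldl (fun acc vn =>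
    if pvPg L u f vn then acc ++ [(vn.1, f - pvC L u vn, p ++ [vn.1])] else acc) []

-- the same loop for the very first (peeled) iteration, whose item may carry a negative start index:
-- no gate (a wrapped negative start can move at cost 0 to its canonical alias)
def pvRootChildren (L : List Int) (u f : Int) (p : List Int) : List (Int × Int × List Int) :=
  (PySem.List.enumerate L).foldl (fun acc vn =>
    if pvP0 L u f vn then acc ++ [(vn.1, f - pvC L u vn, p ++ [vn.1])] else acc) []

-- termination measure for A's BFS loop and its key bound (used by loopA's decreasing_by)
def pvMu (n : Nat) (q : List (Int × Int × List Int)) : Nat :=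
  (q.map (fun c => (n + 1) ^ c.2.1.toNat)).sum

lemma pvStepChildren_eq (L : List Int) (u f : Int) (p : List Int) :
    pvStepChildren L u f p =
      ((PySem.List.enumerate L).filter (pvPg L u f)).map
        (fun vn => (vn.1, f - pvC L u vn, p ++ [vn.1])) := by
  unfold pvStepChildren
  rw [PySem.List.foldl_append_if]
  simp

lemma pvStepChildren_mu (L : List Int) (u f : Int) (p : List Int) :
    pvMu L.length (pvStepChildren L u f p) < (L.length + 1) ^ f.toNat := by
  rw [pvStepChildren_eq]
  unfold pvMu
  rw [List.map_map]
  by_cases hf : 1 ≤ f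
  · have hw : ∀ x ∈ ((PySem.List.enumerate L).filter (pvPg L u f)).map
        ((fun c => (L.length + 1) ^ c.2.1.toNat) ∘ fun vn => (vn.1, f - pvC L u vn, p ++ [vn.1])),
        x ≤ (L.length + 1) ^ (f.toNat - 1) := by
      intro x hx
      simp only [List.mem_map, List.mem_filter, Function.comp] at hx
      obtain ⟨vn, ⟨-, hp⟩, rfl⟩ := hx
      simp only [pvPg, decide_eq_true_eq] at hp
      apply Nat.pow_le_pow_right (by omega)
      omega
    calc (((PySem.List.enumerate L).filter (pvPg L u f)).map _).sum
        ≤ (((PySem.List.enumerate L).filter (pvPg L u f)).map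
            ((fun c => (L.length + 1) ^ c.2.1.toNat) ∘ fun vn => (vn.1, f - pvC L u vn, p ++ [vn.1]))).length
            * (L.length + 1) ^ (f.toNat - 1) := by
          simpa using List.sum_le_card_nsmul _ _ hw
      _ ≤ L.length * (L.length + 1) ^ (f.toNat - 1) := by
          apply Nat.mul_le_mul_right
          calc _ = ((PySem.List.enumerate L).filter (pvPg L u f)).length := List.length_map ..
            _ ≤ (PySem.List.enumerate L).length := List.length_filter_le _ _
            _ = L.length := PySem.List.length_enumerate L 0
      _ < (L.length + 1) * (L.length + 1) ^ (f.toNat - 1) := by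
          have hp : 0 < (L.length + 1) ^ (f.toNat - 1) := Nat.pow_pos (by omega)
          exact Nat.mul_lt_mul_of_lt_of_le (Nat.lt_succ_self _) (le_refl _) hp
      _ = (L.length + 1) ^ f.toNat := by
          rw [← pow_succ']
          congr 1
          omega
  · have : (PySem.List.enumerate L).filter (pvPg L u f) = [] := by
      apply List.filter_eq_nil_iff.mpr
      intro a _
      simp only [pvPg, decide_eq_true_eq]
      rintro ⟨-, h1, h2⟩
      omega
    rw [this]
    exact Nat.pow_pos (by omega)

-- A's while-loop: pop (u, fuel, path) from the queue front, record a winning path, append children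
def loopA (L : List Int) (fin : Int) : List (Int × Int × List Int) → PySem.Set (List Int) → Int
  | [], w => Int.ofNat w.length
  | (u, f, p) :: rest, w =>
    let w' := if u = fin ∧ ¬ p ∈ w then PySem.Set.add w p else w
    loopA L fin (rest ++ pvStepChildren L u f p) w'
termination_by q _ => pvMu L.length q
decreasing_by
  have h := pvStepChildren_mu L u f p
  simp only [pvMu, List.map_append, List.sum_append, List.map_cons, List.sum_cons] at *
  omega

-- port of A: the first loop iteration (queue = the singleton root (start, fuel, [start])) is peeled
-- off, then loopA runs the rest of the while-loop.
def countRoutes1 (locations : List Int) (start : Int) (finish : Int) (fuel : Int) : Int :=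
  let w0 : PySem.Set (List Int) := PySem.Set.ofList []
  let w1 := if start = finish ∧ ¬ [start] ∈ w0 then PySem.Set.add w0 [start] else w0
  loopA locations finish (pvRootChildren locations start fuel [start]) w1

-- ===== PORT B =====
-- the inner 'for v, loc in enumerate(locations)' loop of B: accumulates (total, pending, ready)
def pvBFold (L : List Int) (fin : Int) (memo : PySem.Dict (Int × Int) Int) (u f : Int) :
    Int × List (Int × Int) × Bool :=
  (PySem.List.enumerate L).foldl (fun st vn =>
    if pvP0 L u f vn then
      match memo.get? (vn.1, f - pvC L u vn) with
      | none => (st.1, st.2.1 ++ [(vn.1, f - pvC L u vn)], false)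
      | some r => (st.1 + r, st.2.1, st.2.2)
    else st) ((if u = fin then (1 : Int) else 0), ([] : List (Int × Int)), true)

-- B's while-loop over the explicit stack (list head = Python's stack top, so Python's
-- stack.extend(pending) is pending.reverse ++ rest).  gas is a totality fuel only: under Pre_
-- the loop is proved to finish with gas to spare.
def loopB (L : List Int) (fin : Int) :
    Nat → List (Int × Int) → PySem.Dict (Int × Int) Int → PySem.Dict (Int × Int) Int
  | 0, _, memo => memo
  | _ + 1, [], memo => memo
  | gas + 1, (u, f) :: rest, memo =>
    if (memo.get? (u, f)).isSome then loopB L fin gas rest memo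
    else
      let st := pvBFold L fin memo u f
      if st.2.2 then loopB L fin gas rest (memo.insert (u, f) st.1)
      else loopB L fin gas (st.2.1.reverse ++ (u, f) :: rest) memo

-- gas budget: proved sufficient under Pre_ (iterations ≤ (2n+3)·(number of memoised states) + O(n))
def pvGas (L : List Int) (fuel : Int) : Nat :=
  (2 * L.length + 3) * (L.length * (fuel.toNat + 1) + 2) + 2 * L.length + 16

def countRoutes1_alt (locations : List Int) (start : Int) (finish : Int) (fuel : Int) : Int :=
  -- Python's final 'return memo[(start, fuel)]': whenever B returns, the key is present,
  -- so the getD default is never used under Pre_.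
  (loopB locations finish (pvGas locations fuel) [(start, fuel)] PySem.Dict.empty).getD
    (start, fuel) 0

-- ===== PRECONDITION & SPEC =====
-- pvSafe L S F: no value occurs at two distinct indices of L within direct-move fuel range of S
-- (S = the start city's location).  By the triangle inequality (any path from start to city i costs
-- at least |S - locations[i]|, and the direct move costs exactly that), ¬pvSafe with fuel ≥ 0 is
-- EXACTLY when A can reach a zero-cost two-city cycle and its queue grows forever.
def pvSafe (L : List Int) (S F : Int) : Prop :=
  ∀ vn ∈ PySem.List.enumerate L, ∀ wm ∈ PySem.List.enumerate L,
    vn.1 ≠ wm.1 → vn.2 = wm.2 → F < |S - vn.2|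

-- Pre_ excludes exactly (a) start indices on which A raises IndexError (locations[start] is
-- evaluated whenever the list has a city other than start), and (b) the inputs on which A never
-- returns: fuel ≥ 0 and some duplicated location value is affordable from start, so A's queue
-- ping-pongs on a zero-cost pair forever.  No input on which A returns a value is excluded.
def Pre_countRoutes1 (locations : List Int) (start : Int) (finish : Int) (fuel : Int) : Prop :=
  ((1 ≤ locations.length ∧ ¬(locations.length = 1 ∧ start = 0)) →
      (-(locations.length : Int) ≤ start ∧ start < (locations.length : Int)))
  ∧ (fuel < 0 ∨ pvSafe locations (PySem.List.pyGetD locations start 0) fuel)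

instance (locations : List Int) (start : Int) (finish : Int) (fuel : Int) :
    Decidable (Pre_countRoutes1 locations start finish fuel) := by
  unfold Pre_countRoutes1; unfold pvSafe; infer_instance

def pvWitness_countRoutes1 : List Int × Int × Int × Int := ([0, 3, 9], 0, 2, 10)

def Spec_countRoutes1 (locations : List Int) (start : Int) (finish : Int) (fuel : Int) (out : Int) : Prop := out = countRoutes1_alt locations start finish fuel
instance (locations : List Int) (start : Int) (finish : Int) (fuel : Int) (out : Int) : Decidable (Spec_countRoutes1 locations start finish fuel out) := by unfold Spec_countRoutes1; infer_instance

-- ===== CLAIM (what is proved, stated in full; the proofs are below) =====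
def Claim_equal_countRoutes1 : Prop := ∀ (locations : List Int) (start : Int) (finish : Int) (fuel : Int), Dom_countRoutes1 locations start finish fuel → Pre_countRoutes1 locations start finish fuel → Spec_countRoutes1 locations start finish fuel (countRoutes1 locations start finish fuel)

-- ===== LEMMAS AND PROOFS =====

-- The common mathematical value both programs compute: pvG L fin u f = number of routes from u to
-- fin within fuel f (counting the empty route when u = fin), restricted to moves of cost ≥ 1
-- (the gate is invisible on the inputs where it is used: canonical reachable u under pvSafe).
mutual
def pvG (L : List Int) (fin : Int) (u f : Int) : Int :=
  (if u = fin then 1 else 0) + pvGAux L fin u f (PySem.List.enumerate L) 0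
termination_by (f.toNat + 1) * (L.length + 2)
decreasing_by
  have hl : (PySem.List.enumerate L).length = L.length := PySem.List.length_enumerate L 0
  have : (f.toNat + 1) * (L.length + 2) = f.toNat * (L.length + 2) + (L.length + 2) := by ring
  omega

def pvGAux (L : List Int) (fin : Int) (u f : Int) : List (Int × Int) → Int → Int
  | [], acc => acc
  | vn :: tl, acc =>
    if h : pvPg L u f vn = true then
      pvGAux L fin u f tl (acc + pvG L fin vn.1 (f - pvC L u vn))
    else
      pvGAux L fin u f tl acc
termination_by l _ => f.toNat * (L.length + 2) + l.length + 1
decreasing_by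
  all_goals simp only [List.length_cons]
  all_goals try omega
  all_goals
    simp only [pvPg, decide_eq_true_eq] at h
    obtain ⟨-, hle, hge⟩ := h
    have h2 : (f - pvC L u vn).toNat + 1 ≤ f.toNat := by omega
    have h3 : ((f - pvC L u vn).toNat + 1) * (L.length + 2) ≤ f.toNat * (L.length + 2) :=
      Nat.mul_le_mul_right _ h2
    omega
end

lemma pvRootChildren_eq (L : List Int) (u f : Int) (p : List Int) :
    pvRootChildren L u f p =
      ((PySem.List.enumerate L).filter (pvP0 L u f)).map
        (fun vn => (vn.1, f - pvC L u vn, p ++ [vn.1])) := by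
  unfold pvRootChildren
  rw [PySem.List.foldl_append_if]
  simp

lemma pvGAux_eq (L : List Int) (fin : Int) (u f : Int) (l : List (Int × Int)) (acc : Int) :
    pvGAux L fin u f l acc =
      acc + ((l.filter (pvPg L u f)).map (fun vn => pvG L fin vn.1 (f - pvC L u vn))).sum := by
  induction l generalizing acc with
  | nil => simp [pvGAux]
  | cons vn tl ih =>
    rw [pvGAux]
    by_cases h : pvPg L u f vn = true
    · rw [dif_pos h, ih, List.filter_cons_of_pos h]
      simp
      ring
    · rw [dif_neg h, ih, List.filter_cons_of_neg (by simpa using h)]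

lemma pvG_eq (L : List Int) (fin : Int) (u f : Int) :
    pvG L fin u f = (if u = fin then 1 else 0) +
      (((PySem.List.enumerate L).filter (pvPg L u f)).map
        (fun vn => pvG L fin vn.1 (f - pvC L u vn))).sum := by
  rw [pvG, pvGAux_eq]
  ring

-- the (city, remaining fuel) successor states of (u, f), ungated (Python's actual move test)
def pvKids (L : List Int) (u f : Int) : List (Int × Int) :=
  ((PySem.List.enumerate L).filter (pvP0 L u f)).map (fun vn => (vn.1, f - pvC L u vn))

lemma pvGetD_canon (L : List Int) (u : Int) (h0 : 0 ≤ u) (h1 : u < (L.length : Int)) :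
    PySem.List.pyGetD L u 0 = L[u.toNat]'(by omega) := by
  have h2 : PySem.List.pyGetD L ((u.toNat : Nat) : Int) 0 = L.getD u.toNat 0 :=
    PySem.List.pyGetD_natCast L u.toNat 0
  rw [show ((u.toNat : Nat) : Int) = u by omega] at h2
  rw [h2, List.getD_eq_getElem]

-- under pvSafe, at a canonical state whose reach bound |S - loc[u]| ≤ F - f holds, the gate is
-- invisible: every affordable move from u has cost ≥ 1
lemma pvP_eq (L : List Int) (S F u f : Int) (hsafe : pvSafe L S F)
    (h0 : 0 ≤ u) (h1 : u < (L.length : Int)) (hf0 : 0 ≤ f)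
    (hreach : |S - PySem.List.pyGetD L u 0| ≤ F - f) :
    ∀ vn ∈ PySem.List.enumerate L, pvP0 L u f vn = pvPg L u f vn := by
  intro vn hv
  rw [PySem.List.mem_enumerate_iff] at hv
  obtain ⟨k, hk, rfl⟩ := hv
  simp only [pvP0, pvPg, decide_eq_decide]
  constructor
  · rintro ⟨hne, hle⟩
    refine ⟨hne, hle, ?_⟩
    by_contra hc
    have hu := pvGetD_canon L u h0 h1
    have habs : (0 : Int) ≤ pvC L u ((0 : Int) + (k : Int), L[k]) := abs_nonneg _
    have hc0 : pvC L u ((0 : Int) + (k : Int), L[k]) = 0 := by omega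
    have heqv : L[u.toNat]'(by omega) = L[k] := by
      simp only [pvC, hu] at hc0
      have := abs_eq_zero.mp hc0
      omega
    have hm1 : ((0 : Int) + (u.toNat : Int), L[u.toNat]'(by omega)) ∈ PySem.List.enumerate L := by
      rw [PySem.List.mem_enumerate_iff]
      exact ⟨u.toNat, by omega, rfl⟩
    have hm2 : ((0 : Int) + (k : Int), L[k]) ∈ PySem.List.enumerate L := by
      rw [PySem.List.mem_enumerate_iff]
      exact ⟨k, hk, rfl⟩
    have hidx : ((0 : Int) + (u.toNat : Int)) ≠ ((0 : Int) + (k : Int)) := by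
      simp only [zero_add] at hne ⊢
      omega
    have hbig := hsafe _ hm1 _ hm2 hidx (by simpa using heqv)
    simp only [hu] at hreach
    simp only at hbig
    omega
  · rintro ⟨hne, hle, -⟩
    exact ⟨hne, hle⟩

lemma pvKids_eq_gated (L : List Int) (S F u f : Int) (hsafe : pvSafe L S F)
    (h0 : 0 ≤ u) (h1 : u < (L.length : Int)) (hf0 : 0 ≤ f)
    (hreach : |S - PySem.List.pyGetD L u 0| ≤ F - f) :
    pvKids L u f = ((PySem.List.enumerate L).filter (pvPg L u f)).map
      (fun vn => (vn.1, f - pvC L u vn)) := by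
  unfold pvKids
  rw [List.filter_congr (fun vn hv => pvP_eq L S F u f hsafe h0 h1 hf0 hreach vn hv)]

lemma pvKids_mem (L : List Int) (u f : Int) {k : Int × Int} (hk : k ∈ pvKids L u f) :
    0 ≤ k.1 ∧ k.1 < (L.length : Int) ∧ k.1 ≠ u ∧ 0 ≤ k.2 ∧ k.2 ≤ f := by
  unfold pvKids at hk
  simp only [List.mem_map, List.mem_filter] at hk
  obtain ⟨vn, ⟨hv, hp⟩, rfl⟩ := hk
  rw [PySem.List.mem_enumerate_iff] at hv
  obtain ⟨j, hj, rfl⟩ := hv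
  simp only [pvP0, decide_eq_true_eq] at hp
  obtain ⟨hne, hle⟩ := hp
  have habs : (0 : Int) ≤ pvC L u ((0 : Int) + (j : Int), L[j]) := abs_nonneg _
  dsimp only
  simp only [zero_add] at hne hle habs ⊢
  exact ⟨by omega, by omega, hne, by omega, by omega⟩

-- reach bound propagates to children: |S - loc[child]| ≤ |S - loc[u]| + cost (triangle inequality)
lemma pvKids_reach (L : List Int) (S F u f : Int)
    (hreach : |S - PySem.List.pyGetD L u 0| ≤ F - f) :
    ∀ k ∈ pvKids L u f, |S - PySem.List.pyGetD L k.1 0| ≤ F - k.2 := by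
  intro k hk
  have hmem := pvKids_mem L u f hk
  unfold pvKids at hk
  simp only [List.mem_map, List.mem_filter] at hk
  obtain ⟨vn, ⟨hv, hp⟩, rfl⟩ := hk
  rw [PySem.List.mem_enumerate_iff] at hv
  obtain ⟨j, hj, rfl⟩ := hv
  have hcanon : PySem.List.pyGetD L ((0 : Int) + (j : Int)) 0 = L[j] := by
    rw [pvGetD_canon L _ (by omega) (by push_cast; omega)]
    congr 1
    omega
  have htri : |S - L[j]| ≤ |S - PySem.List.pyGetD L u 0| + |PySem.List.pyGetD L u 0 - L[j]| :=
    abs_sub_le _ _ _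
  simp only [pvC] at *
  simp only [hcanon]
  omega

lemma pvKids_mem_lt (L : List Int) (S F u f : Int) (hsafe : pvSafe L S F)
    (h0 : 0 ≤ u) (h1 : u < (L.length : Int)) (hf0 : 0 ≤ f)
    (hreach : |S - PySem.List.pyGetD L u 0| ≤ F - f)
    {k : Int × Int} (hk : k ∈ pvKids L u f) : k.2 < f := by
  rw [pvKids_eq_gated L S F u f hsafe h0 h1 hf0 hreach] at hk
  simp only [List.mem_map, List.mem_filter] at hk
  obtain ⟨vn, ⟨-, hp⟩, rfl⟩ := hk
  simp only [pvPg, decide_eq_true_eq] at hp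
  simp only []
  omega

-- ========== A side: the BFS loop counts winning paths = pvQsum ==========
def pvQsum (L : List Int) (fin : Int) (q : List (Int × Int × List Int)) : Int :=
  (q.map (fun c => pvG L fin c.1 c.2.1)).sum

def pvPaths (q : List (Int × Int × List Int)) : List (List Int) := q.map (fun c => c.2.2)

def pvInv (E : List (List Int)) (q : List (Int × Int × List Int)) (w : List (List Int)) : Prop :=
  E.Nodup ∧ (∀ p ∈ E, p ≠ [] ∧ (p.length = 1 ∨ p.dropLast ∈ E)) ∧
  (pvPaths q).Nodup ∧ (∀ p ∈ pvPaths q, p ∉ E ∧ p ≠ [] ∧ (p.length = 1 ∨ p.dropLast ∈ E)) ∧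
  (∀ p ∈ w, p ∈ E)

lemma pvChildPaths (L : List Int) (u f : Int) (p : List Int) :
    pvPaths (pvStepChildren L u f p) =
      ((PySem.List.enumerate L).filter (pvPg L u f)).map (fun vn => p ++ [vn.1]) := by
  unfold pvPaths
  rw [pvStepChildren_eq, List.map_map]
  rfl

lemma pvPathsMap_nodup (l : List (Int × Int)) (hpw : l.Pairwise (fun a b => a.1 < b.1))
    (p : List Int) : (l.map (fun vn => p ++ [vn.1])).Nodup := by
  refine List.Pairwise.map _ ?_ hpw
  intro a b hab hEq
  have h2 : a.1 = b.1 := by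
    have := List.append_cancel_left hEq
    simpa using this
  omega

lemma pvChildPaths_mem (L : List Int) (u f : Int) (p : List Int) {q : List Int}
    (hq : q ∈ pvPaths (pvStepChildren L u f p)) : ∃ v : Int, q = p ++ [v] := by
  rw [pvChildPaths] at hq
  simp only [List.mem_map] at hq
  obtain ⟨vn, -, rfl⟩ := hq
  exact ⟨vn.1, rfl⟩

lemma pvInv_step (L : List Int) (E : List (List Int)) (u f : Int) (p : List Int)
    (rest : List (Int × Int × List Int)) (w : PySem.Set (List Int))
    (hInv : pvInv E ((u, f, p) :: rest) w) (w' : List (List Int))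
    (hw' : w' = w ∨ w' = w ++ [p]) :
    pvInv (E ++ [p]) (rest ++ pvStepChildren L u f p) w' := by
  obtain ⟨hE1, hE2, hQ1, hQ2, hW⟩ := hInv
  have hpQ : p ∉ E ∧ p ≠ [] ∧ (p.length = 1 ∨ p.dropLast ∈ E) := hQ2 p (by simp [pvPaths])
  have hrestQ : ∀ q ∈ pvPaths rest, q ∉ E ∧ q ≠ [] ∧ (q.length = 1 ∨ q.dropLast ∈ E) := by
    intro q hq
    exact hQ2 q (by simp [pvPaths] at hq ⊢; exact Or.inr hq)
  have hcons : p ∉ pvPaths rest ∧ (pvPaths rest).Nodup := by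
    have : pvPaths ((u, f, p) :: rest) = p :: pvPaths rest := by simp [pvPaths]
    rw [this] at hQ1
    exact List.nodup_cons.mp hQ1
  have hplen : 1 ≤ p.length := by
    cases p
    · exact absurd rfl hpQ.2.1
    · simp
  have hkidlen : ∀ q ∈ pvPaths (pvStepChildren L u f p), q.length = p.length + 1 := by
    intro q hq
    obtain ⟨v, rfl⟩ := pvChildPaths_mem L u f p hq
    simp
  have hkiddrop : ∀ q ∈ pvPaths (pvStepChildren L u f p), q.dropLast = p := by
    intro q hq
    obtain ⟨v, rfl⟩ := pvChildPaths_mem L u f p hq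
    exact List.dropLast_concat
  have hkidE : ∀ q ∈ pvPaths (pvStepChildren L u f p), q ∉ E := by
    intro q hq hqE
    have h2 := hE2 q hqE
    rcases h2.2 with h | h
    · have := hkidlen q hq
      omega
    · rw [hkiddrop q hq] at h
      exact hpQ.1 h
  have hkidnotp : ∀ q ∈ pvPaths (pvStepChildren L u f p), q ≠ p := by
    intro q hq hEq
    have := hkidlen q hq
    rw [hEq] at this
    omega
  refine ⟨?_, ?_, ?_, ?_, ?_⟩
  · rw [List.nodup_append]
    refine ⟨hE1, List.nodup_singleton _, ?_⟩
    intro a ha b hb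
    simp only [List.mem_singleton] at hb
    subst hb
    intro hEq
    exact hpQ.1 (hEq ▸ ha)
  · intro p' hp'
    rcases List.mem_append.mp hp' with h | h
    · exact ⟨(hE2 p' h).1, (hE2 p' h).2.imp id (fun hh => List.mem_append_left _ hh)⟩
    · simp only [List.mem_singleton] at h
      subst h
      exact ⟨hpQ.2.1, hpQ.2.2.imp id (fun hh => List.mem_append_left _ hh)⟩
  · have hsplit : pvPaths (rest ++ pvStepChildren L u f p)
        = pvPaths rest ++ pvPaths (pvStepChildren L u f p) := by simp [pvPaths]
    rw [hsplit]
    rw [List.nodup_append]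
    refine ⟨hcons.2, ?_, ?_⟩
    · rw [pvChildPaths]
      exact pvPathsMap_nodup _ ((PySem.List.pairwise_lt_enumerate L 0).filter _) p
    · intro q hq q' hq' hEq
      subst hEq
      have hlen := hkidlen q hq'
      rcases (hrestQ q hq).2.2 with h | h
      · omega
      · rw [hkiddrop q hq'] at h
        exact hpQ.1 h
  · intro q hq
    have hsplit : pvPaths (rest ++ pvStepChildren L u f p)
        = pvPaths rest ++ pvPaths (pvStepChildren L u f p) := by simp [pvPaths]
    rw [hsplit] at hq
    rcases List.mem_append.mp hq with h | h
    · have h1 := hrestQ q h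
      refine ⟨?_, h1.2.1, h1.2.2.imp id (fun hh => List.mem_append_left _ hh)⟩
      intro hmem
      rcases List.mem_append.mp hmem with h2 | h2
      · exact h1.1 h2
      · simp only [List.mem_singleton] at h2
        subst h2
        exact hcons.1 h
    · obtain ⟨v, hv⟩ := pvChildPaths_mem L u f p h
      refine ⟨?_, by subst hv; simp, Or.inr ?_⟩
      · intro hmem
        rcases List.mem_append.mp hmem with h2 | h2
        · exact hkidE q h h2
        · simp only [List.mem_singleton] at h2
          exact hkidnotp q h h2
      · rw [hkiddrop q h]
        simp
  · intro q hq
    rcases hw' with rfl | rfl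
    · exact List.mem_append_left _ (hW q hq)
    · rcases List.mem_append.mp hq with h | h
      · exact List.mem_append_left _ (hW q h)
      · simp only [List.mem_singleton] at h
        subst h
        simp

lemma pvG_eq_step (L : List Int) (fin : Int) (u f : Int) (p : List Int) :
    pvG L fin u f = (if u = fin then 1 else 0) + pvQsum L fin (pvStepChildren L u f p) := by
  rw [pvG_eq]
  unfold pvQsum
  rw [pvStepChildren_eq, List.map_map]
  rfl

lemma loopA_eq (L : List Int) (fin : Int) :
    ∀ (q : List (Int × Int × List Int)) (w : PySem.Set (List Int)) (E : List (List Int)),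
      pvInv E q w → loopA L fin q w = Int.ofNat w.length + pvQsum L fin q := by
  intro q w
  induction q, w using loopA.induct L fin with
  | case1 w =>
    intro E hInv
    rw [loopA]
    simp [pvQsum]
  | case2 u f p rest w w' ih =>
    intro E hInv
    have hpnotW : p ∉ w := by
      obtain ⟨hE1, hE2, hQ1, hQ2, hW⟩ := hInv
      intro h
      exact (hQ2 p (by simp [pvPaths])).1 (hW p h)
    have hwdef : w' = if u = fin ∧ ¬ p ∈ w then PySem.Set.add w p else w := rfl
    rw [loopA]
    by_cases hf : u = fin
    · have hcond : u = fin ∧ ¬ p ∈ w := ⟨hf, hpnotW⟩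
      rw [if_pos hcond] at hwdef ⊢
      rw [PySem.Set.add_of_not_mem hpnotW] at hwdef ⊢
      rw [hwdef] at ih
      rw [ih (E ++ [p]) (pvInv_step L E u f p rest w hInv _ (Or.inr rfl))]
      have hg := pvG_eq_step L fin u f p
      rw [if_pos hf] at hg
      simp only [pvQsum, List.map_append, List.sum_append, List.map_cons, List.sum_cons] at *
      push_cast [List.length_append, List.length_singleton, Int.ofNat_eq_natCast]
      omega
    · have hcond : ¬ (u = fin ∧ ¬ p ∈ w) := fun hh => hf hh.1
      rw [if_neg hcond] at hwdef ⊢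
      rw [hwdef] at ih
      rw [ih (E ++ [p]) (pvInv_step L E u f p rest w hInv _ (Or.inl rfl))]
      have hg := pvG_eq_step L fin u f p
      rw [if_neg hf] at hg
      simp only [pvQsum, List.map_append, List.sum_append, List.map_cons, List.sum_cons] at *
      push_cast [List.length_append, List.length_singleton, Int.ofNat_eq_natCast]
      omega

def pvTop (L : List Int) (fin s fu : Int) : Int :=
  (if s = fin then 1 else 0) + ((pvKids L s fu).map (fun k => pvG L fin k.1 k.2)).sum

lemma countRoutes1_eq_top (L : List Int) (s fin fu : Int) :
    countRoutes1 L s fin fu = pvTop L fin s fu := by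
  have h0 : (PySem.Set.ofList [] : PySem.Set (List Int)) = [] := rfl
  have hmem : ¬ ([s] ∈ (PySem.Set.ofList [] : PySem.Set (List Int))) := by
    rw [h0]
    simp
  have hroot : pvPaths (pvRootChildren L s fu [s])
      = ((PySem.List.enumerate L).filter (pvP0 L s fu)).map (fun vn => [s] ++ [vn.1]) := by
    unfold pvPaths
    rw [pvRootChildren_eq, List.map_map]
    rfl
  have hInv : pvInv [[s]] (pvRootChildren L s fu [s])
      (if s = fin ∧ ¬ [s] ∈ (PySem.Set.ofList [] : PySem.Set (List Int)) then
        PySem.Set.add (PySem.Set.ofList []) [s] else PySem.Set.ofList []) := by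
    refine ⟨by simp, by simp, ?_, ?_, ?_⟩
    · rw [hroot]
      exact pvPathsMap_nodup _ ((PySem.List.pairwise_lt_enumerate L 0).filter _) [s]
    · intro q hq
      rw [hroot] at hq
      simp only [List.mem_map] at hq
      obtain ⟨vn, -, rfl⟩ := hq
      refine ⟨by simp, by simp, Or.inr (by simp)⟩
    · intro q hq
      by_cases hf : s = fin
      · rw [if_pos ⟨hf, hmem⟩, PySem.Set.add_of_not_mem hmem, h0] at hq
        simpa using hq
      · rw [if_neg (fun hh => hf hh.1), h0] at hq
        simp at hq
  have hmain := loopA_eq L fin (pvRootChildren L s fu [s]) _ [[s]] hInv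
  show loopA L fin (pvRootChildren L s fu [s])
      (if s = fin ∧ ¬ [s] ∈ (PySem.Set.ofList [] : PySem.Set (List Int)) then
        PySem.Set.add (PySem.Set.ofList []) [s] else PySem.Set.ofList []) = pvTop L fin s fu
  rw [hmain]
  have hq : pvQsum L fin (pvRootChildren L s fu [s])
      = ((pvKids L s fu).map (fun k => pvG L fin k.1 k.2)).sum := by
    unfold pvQsum pvKids
    rw [pvRootChildren_eq, List.map_map, List.map_map]
    rfl
  rw [hq]
  unfold pvTop
  by_cases hf : s = fin
  · rw [if_pos ⟨hf, hmem⟩, if_pos hf, PySem.Set.add_of_not_mem hmem, h0]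
    simp
  · rw [if_neg (fun hh => hf hh.1), if_neg hf, h0]
    simp

-- ========== B side: the memoised stack loop computes pvG ==========
-- a resolvable state: canonical index, fuel within budget, and reachable within the global fuel F
def pvState (L : List Int) (S F : Int) (k : Int × Int) : Prop :=
  0 ≤ k.1 ∧ k.1 < (L.length : Int) ∧ 0 ≤ k.2 ∧ k.2 ≤ F ∧
    |S - PySem.List.pyGetD L k.1 0| ≤ F - k.2

def pvMemoOK (L : List Int) (fin S F : Int) (m : PySem.Dict (Int × Int) Int) : Prop :=
  m.keys.Nodup ∧ ∀ k v, m.get? k = some v → pvState L S F k ∧ v = pvG L fin k.1 k.2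

def pvDsub (m m' : PySem.Dict (Int × Int) Int) : Prop :=
  ∀ k v, m.get? k = some v → m'.get? k = some v

lemma pvMemoOK_empty (L : List Int) (fin S F : Int) : pvMemoOK L fin S F PySem.Dict.empty := by
  constructor
  · simp [pysem]
  · intro k v h
    simp [pysem] at h

lemma pvMemoOK_size (L : List Int) (fin S F : Int) (m : PySem.Dict (Int × Int) Int)
    (hm : pvMemoOK L fin S F m) : m.size ≤ L.length * (F.toNat + 1) := by
  obtain ⟨hnd, hall⟩ := hm
  have hkeys : ∀ k ∈ m.keys, pvState L S F k := by
    intro k hk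
    rcases ho : m.get? k with _ | v
    · exact absurd hk ((PySem.Dict.get?_eq_none_iff_not_mem_keys m k).mp ho)
    · exact (hall k v ho).1
  have hinj : ∀ x ∈ m.keys, ∀ y ∈ m.keys,
      (fun k : Int × Int => (k.1.toNat, k.2.toNat)) x =
      (fun k : Int × Int => (k.1.toNat, k.2.toNat)) y → x = y := by
    intro x hx y hy hxy
    have hx' := hkeys x hx
    have hy' := hkeys y hy
    unfold pvState at hx' hy'
    simp only [Prod.mk.injEq] at hxy
    exact Prod.ext_iff.mpr ⟨by omega, by omega⟩
  have hndm : (m.keys.map (fun k : Int × Int => (k.1.toNat, k.2.toNat))).Nodup :=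
    List.Nodup.map_on hinj hnd
  have hsub : (m.keys.map (fun k : Int × Int => (k.1.toNat, k.2.toNat))).toFinset ⊆
      Finset.range L.length ×ˢ Finset.range (F.toNat + 1) := by
    intro x hx
    simp only [List.mem_toFinset, List.mem_map] at hx
    obtain ⟨k, hk, rfl⟩ := hx
    have := hkeys k hk
    unfold pvState at this
    simp only [Finset.mem_product, Finset.mem_range]
    omega
  have hcard := Finset.card_le_card hsub
  rw [List.toFinset_card_of_nodup hndm] at hcard
  simp only [Finset.card_product, Finset.card_range, List.length_map] at hcard
  have hsz : m.keys.length = m.size := by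
    simp [PySem.Dict.keys, PySem.Dict.size]
  omega

lemma loopB_nil (L : List Int) (fin : Int) (g : Nat) (m : PySem.Dict (Int × Int) Int) :
    loopB L fin g [] m = m := by
  cases g <;> rfl

lemma pvBFold_run (L : List Int) (fin : Int) (memo : PySem.Dict (Int × Int) Int) (u f : Int) :
    ∀ (l : List (Int × Int)) (t0 : Int) (p0 : List (Int × Int)) (r0 : Bool),
      l.foldl (fun st vn =>
        if pvP0 L u f vn then
          match memo.get? (vn.1, f - pvC L u vn) with
          | none => (st.1, st.2.1 ++ [(vn.1, f - pvC L u vn)], false)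
          | some r => (st.1 + r, st.2.1, st.2.2)
        else st) (t0, p0, r0) =
      (t0 + ((((l.filter (pvP0 L u f)).map (fun vn => (vn.1, f - pvC L u vn))).filter
               (fun k => (memo.get? k).isSome)).map (fun k => (memo.get? k).getD 0)).sum,
       p0 ++ ((l.filter (pvP0 L u f)).map (fun vn => (vn.1, f - pvC L u vn))).filter
               (fun k => (memo.get? k).isNone),
       r0 && ((l.filter (pvP0 L u f)).map (fun vn => (vn.1, f - pvC L u vn))).all
               (fun k => (memo.get? k).isSome)) := by
  intro l
  induction l with
  | nil => intro t0 p0 r0; simp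
  | cons vn tl ih =>
    intro t0 p0 r0
    rw [List.foldl_cons]
    by_cases hp : pvP0 L u f vn = true
    · rw [if_pos hp, List.filter_cons_of_pos hp, List.map_cons]
      cases hg : memo.get? (vn.1, f - pvC L u vn) with
      | none =>
        simp only [hg, ih, List.filter_cons, List.all_cons, Option.isSome_none, Option.isNone_none,
          Bool.false_and, Bool.and_false, if_neg, if_pos, Bool.not_false, cond_true, cond_false]
        simp
      | some r =>
        simp only [hg, ih, List.filter_cons, List.all_cons, Option.isSome_some, Option.isNone_some,
          Bool.true_and, cond_true, cond_false, List.map_cons, List.sum_cons, Option.getD_some]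
        simp [hg, add_assoc]
    · rw [if_neg hp, List.filter_cons_of_neg (by simpa using hp)]
      exact ih t0 p0 r0

lemma pvBFold_spec (L : List Int) (fin : Int) (memo : PySem.Dict (Int × Int) Int) (u f : Int) :
    pvBFold L fin memo u f =
      ((if u = fin then (1 : Int) else 0) +
         (((pvKids L u f).filter (fun k => (memo.get? k).isSome)).map
           (fun k => (memo.get? k).getD 0)).sum,
       (pvKids L u f).filter (fun k => (memo.get? k).isNone),
       (pvKids L u f).all (fun k => (memo.get? k).isSome)) := by
  unfold pvBFold pvKids
  rw [pvBFold_run L fin memo u f]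
  simp

lemma pvTotal_eq0 (L : List Int) (fin : Int) (u f : Int) (memo : PySem.Dict (Int × Int) Int)
    (hok : ∀ k v, memo.get? k = some v → v = pvG L fin k.1 k.2)
    (hall : ∀ k ∈ pvKids L u f, (memo.get? k).isSome = true) :
    (if u = fin then (1 : Int) else 0) +
      (((pvKids L u f).filter (fun k => (memo.get? k).isSome)).map
        (fun k => (memo.get? k).getD 0)).sum = pvTop L fin u f := by
  have hfilter : (pvKids L u f).filter (fun k => (memo.get? k).isSome) = pvKids L u f :=
    List.filter_eq_self.mpr (by intro k hk; simpa using hall k hk)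
  rw [hfilter]
  have hmap : (pvKids L u f).map (fun k => (memo.get? k).getD 0)
      = (pvKids L u f).map (fun k => pvG L fin k.1 k.2) := by
    apply List.map_congr_left
    intro k hk
    obtain ⟨v, hv⟩ := Option.isSome_iff_exists.mp (hall k hk)
    rw [hv]
    simpa using (hok k v hv)
  rw [hmap]
  rfl

lemma pvTop_eq_pvG (L : List Int) (S F : Int) (fin : Int) (u f : Int) (hsafe : pvSafe L S F)
    (hu0 : 0 ≤ u) (hun : u < (L.length : Int)) (hf0 : 0 ≤ f)
    (hreach : |S - PySem.List.pyGetD L u 0| ≤ F - f) : pvTop L fin u f = pvG L fin u f := by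
  rw [pvG_eq]
  unfold pvTop
  congr 1
  rw [pvKids_eq_gated L S F u f hsafe hu0 hun hf0 hreach, List.map_map]
  rfl

lemma pvTotal_eq (L : List Int) (fin S F : Int) (u f : Int) (hsafe : pvSafe L S F)
    (hu0 : 0 ≤ u) (hun : u < (L.length : Int)) (hf0 : 0 ≤ f)
    (hreach : |S - PySem.List.pyGetD L u 0| ≤ F - f) (memo : PySem.Dict (Int × Int) Int)
    (hok : pvMemoOK L fin S F memo)
    (hall : ∀ k ∈ pvKids L u f, (memo.get? k).isSome = true) :
    (if u = fin then (1 : Int) else 0) +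
      (((pvKids L u f).filter (fun k => (memo.get? k).isSome)).map
        (fun k => (memo.get? k).getD 0)).sum = pvG L fin u f := by
  rw [pvTotal_eq0 L fin u f memo (fun k v hv => (hok.2 k v hv).2) hall]
  exact pvTop_eq_pvG L S F fin u f hsafe hu0 hun hf0 hreach

lemma pvResolveList (L : List Int) (fin S F B : Int) (N : Nat)
    (RES : ∀ u f : Int, f.toNat ≤ N → pvState L S F (u, f) →
      ∀ memo, pvMemoOK L fin S F memo →
      ∃ (steps : Nat) (memo' : PySem.Dict (Int × Int) Int),
        (∀ gas rest, loopB L fin (gas + steps) ((u, f) :: rest) memo = loopB L fin gas rest memo') ∧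
        pvMemoOK L fin S F memo' ∧ pvDsub memo memo' ∧ ((memo'.get? (u, f)).isSome = true) ∧
        (∀ k v, memo'.get? k = some v → memo.get? k = some v ∨ k.2 ≤ f) ∧
        memo.size ≤ memo'.size ∧
        steps ≤ (2 * L.length + 3) * (memo'.size - memo.size) + 1 ∧ 1 ≤ steps) :
    ∀ cs : List (Int × Int), (∀ c ∈ cs, c.2.toNat ≤ N ∧ pvState L S F c ∧ c.2 ≤ B) →
    ∀ memo, pvMemoOK L fin S F memo →
    ∃ (steps : Nat) (memo' : PySem.Dict (Int × Int) Int),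
      (∀ gas rest, loopB L fin (gas + steps) (cs ++ rest) memo = loopB L fin gas rest memo') ∧
      pvMemoOK L fin S F memo' ∧ pvDsub memo memo' ∧
      (∀ c ∈ cs, ((memo'.get? c).isSome = true)) ∧
      (∀ k v, memo'.get? k = some v → memo.get? k = some v ∨ k.2 ≤ B) ∧
      memo.size ≤ memo'.size ∧
      steps ≤ (2 * L.length + 3) * (memo'.size - memo.size) + cs.length := by
  intro cs
  induction cs with
  | nil =>
    intro hcs memo hok
    exact ⟨0, memo, fun gas rest => rfl, hok, fun k v h => h, by simp, fun k v h => Or.inl h,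
      le_refl _, by omega⟩
  | cons c tl ih =>
    intro hcs memo hok
    obtain ⟨c1, c2⟩ := c
    obtain ⟨hcN, hcS, hcB⟩ := hcs (c1, c2) (by simp)
    obtain ⟨steps1, memo1, heq1, hok1, hsub1, hsome1, hnew1, hsz1, hstep1, -⟩ :=
      RES c1 c2 hcN hcS memo hok
    obtain ⟨steps2, memo2, heq2, hok2, hsub2, hsome2, hnew2, hsz2, hstep2⟩ :=
      ih (fun c hc => hcs c (List.mem_cons_of_mem _ hc)) memo1 hok1
    refine ⟨steps1 + steps2, memo2, ?_, hok2, fun k v hv => hsub2 k v (hsub1 k v hv),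
      ?_, ?_, by omega, ?_⟩
    · intro gas rest
      have h1 : gas + (steps1 + steps2) = (gas + steps2) + steps1 := by omega
      rw [h1]
      calc loopB L fin ((gas + steps2) + steps1) (((c1, c2) :: tl) ++ rest) memo
          = loopB L fin (gas + steps2) (tl ++ rest) memo1 := heq1 _ _
        _ = loopB L fin gas rest memo2 := heq2 _ _
    · intro c' hc'
      rcases List.mem_cons.mp hc' with rfl | h
      · obtain ⟨v, hv⟩ := Option.isSome_iff_exists.mp hsome1
        rw [hsub2 _ _ hv]
        rfl
      · exact hsome2 c' h
    · intro k v hv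
      rcases hnew2 k v hv with h | h
      · rcases hnew1 k v h with h2 | h2
        · exact Or.inl h2
        · exact Or.inr (le_trans h2 hcB)
      · exact Or.inr h
    · have hd : (2 * L.length + 3) * ((memo1.size - memo.size) + (memo2.size - memo1.size))
          = (2 * L.length + 3) * (memo1.size - memo.size)
            + (2 * L.length + 3) * (memo2.size - memo1.size) := by ring
      have hz : memo2.size - memo.size = (memo1.size - memo.size) + (memo2.size - memo1.size) := by
        omega
      rw [hz, hd]
      simp only [List.length_cons]
      omega

lemma pvResolve (L : List Int) (fin S F : Int) (hsafe : pvSafe L S F) :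
    ∀ fN : Nat, ∀ u f : Int, f.toNat ≤ fN → pvState L S F (u, f) →
    ∀ memo, pvMemoOK L fin S F memo →
    ∃ (steps : Nat) (memo' : PySem.Dict (Int × Int) Int),
      (∀ gas rest, loopB L fin (gas + steps) ((u, f) :: rest) memo = loopB L fin gas rest memo') ∧
      pvMemoOK L fin S F memo' ∧ pvDsub memo memo' ∧ ((memo'.get? (u, f)).isSome = true) ∧
      (∀ k v, memo'.get? k = some v → memo.get? k = some v ∨ k.2 ≤ f) ∧
      memo.size ≤ memo'.size ∧
      steps ≤ (2 * L.length + 3) * (memo'.size - memo.size) + 1 ∧ 1 ≤ steps := by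
  intro fN
  induction fN using Nat.strong_induction_on with
  | _ fN IH =>
  intro u f hfN hstate memo hok
  obtain ⟨hu0, hun, hf0, hfF, hreach⟩ := hstate
  by_cases hhit : (memo.get? (u, f)).isSome = true
  · refine ⟨1, memo, ?_, hok, fun k v h => h, hhit, fun k v h => Or.inl h, le_refl _,
      by omega, by omega⟩
    intro gas rest
    simp [loopB, hhit]
  · have hfold := pvBFold_spec L fin memo u f
    by_cases hready : ((pvKids L u f).all (fun k => (memo.get? k).isSome)) = true
    · -- every successor already memoised: one iteration, insert (u, f)
      have hall : ∀ k ∈ pvKids L u f, (memo.get? k).isSome = true := by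
        intro k hk
        exact (List.all_eq_true.mp hready) k hk
      have hval : (pvBFold L fin memo u f).1 = pvG L fin u f := by
        rw [hfold]
        exact pvTotal_eq L fin S F u f hsafe hu0 hun hf0 hreach memo hok hall
      have hcont : memo.contains (u, f) = false := by
        rw [PySem.Dict.contains_eq_isSome_get?]
        simpa using hhit
      refine ⟨1, memo.insert (u, f) ((pvBFold L fin memo u f).1), ?_, ?_, ?_, ?_, ?_, ?_, ?_, by omega⟩
      · intro gas rest
        have h22 : (pvBFold L fin memo u f).2.2 = true := by rw [hfold]; exact hready
        simp only [loopB]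
        rw [if_neg (by simpa using hhit), if_pos h22]
      · constructor
        · exact PySem.Dict.nodup_keys_insert _ _ _ hok.1
        · intro k v hv
          rw [PySem.Dict.get?_insert] at hv
          split_ifs at hv with hk
          · subst hk
            cases hv
            exact ⟨⟨hu0, hun, hf0, hfF, hreach⟩, hval⟩
          · exact hok.2 k v hv
      · intro k v hv
        have hk : k ≠ (u, f) := by
          rintro rfl
          rw [hv] at hhit
          simp at hhit
        rw [PySem.Dict.get?_insert]
        rw [if_neg hk]
        exact hv
      · rw [PySem.Dict.get?_insert_self]
        rfl
      · intro k v hv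
        rw [PySem.Dict.get?_insert] at hv
        split_ifs at hv with hk
        · subst hk
          exact Or.inr (le_refl _)
        · exact Or.inl hv
      · rw [PySem.Dict.size_insert, if_neg (by simp [hcont])]
        omega
      · rw [PySem.Dict.size_insert, if_neg (by simp [hcont])]
        have : memo.size + 1 - memo.size = 1 := by omega
        rw [this]
        omega
    · -- some successor missing: push pending, resolve them, then redo (u, f)
      have hpend : (pvBFold L fin memo u f).2.1
          = (pvKids L u f).filter (fun k => (memo.get? k).isNone) := by rw [hfold]
      have h22 : (pvBFold L fin memo u f).2.2 = false := by
        rw [hfold]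
        simpa using hready
      obtain ⟨k0, hk0mem, hk0none⟩ : ∃ k ∈ pvKids L u f, ¬ ((memo.get? k).isSome = true) := by
        by_contra hcon
        push_neg at hcon
        exact hready (List.all_eq_true.mpr (fun k hk => by simpa using hcon k hk))
      have hk0lt : k0.2 < f := pvKids_mem_lt L S F u f hsafe hu0 hun hf0 hreach hk0mem
      have hk0props := pvKids_mem L u f hk0mem
      have hf1 : 1 ≤ f := by omega
      have hfN1 : 1 ≤ fN := by omega
      have hcs : ∀ c ∈ ((pvKids L u f).filter (fun k => (memo.get? k).isNone)).reverse,
          c.2.toNat ≤ fN - 1 ∧ pvState L S F c ∧ c.2 ≤ f - 1 := by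
        intro c hc
        rw [List.mem_reverse, List.mem_filter] at hc
        have hm := pvKids_mem L u f hc.1
        have hr := pvKids_reach L S F u f hreach c hc.1
        have hlt := pvKids_mem_lt L S F u f hsafe hu0 hun hf0 hreach hc.1
        exact ⟨by omega, ⟨hm.1, hm.2.1, hm.2.2.2.1, by omega, hr⟩, by omega⟩
      obtain ⟨steps2, memo2, heq2, hok2, hsub2, hsome2, hnew2, hsz2, hstep2⟩ :=
        pvResolveList L fin S F (f - 1) (fN - 1)
          (fun u' f' hf' hs' => IH (fN - 1) (by omega) u' f' hf' hs')
          ((pvKids L u f).filter (fun k => (memo.get? k).isNone)).reverse hcs memo hok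
      have hnone2 : memo2.get? (u, f) = none := by
        rcases h2 : memo2.get? (u, f) with _ | v
        · rfl
        · rcases hnew2 _ _ h2 with h3 | h3
          · rw [h3] at hhit
            simp at hhit
          · have h4 : f ≤ f - 1 := h3
            omega
      have hall2 : ∀ k ∈ pvKids L u f, (memo2.get? k).isSome = true := by
        intro k hk
        by_cases hks : (memo.get? k).isSome = true
        · obtain ⟨v, hv⟩ := Option.isSome_iff_exists.mp hks
          rw [hsub2 k v hv]
          rfl
        · apply hsome2
          rw [List.mem_reverse, List.mem_filter]
          exact ⟨hk, by simpa using hks⟩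
      have hfold2 := pvBFold_spec L fin memo2 u f
      have hval2 : (pvBFold L fin memo2 u f).1 = pvG L fin u f := by
        rw [hfold2]
        exact pvTotal_eq L fin S F u f hsafe hu0 hun hf0 hreach memo2 hok2 hall2
      have h22b : (pvBFold L fin memo2 u f).2.2 = true := by
        rw [hfold2]
        exact List.all_eq_true.mpr hall2
      have hcont2 : memo2.contains (u, f) = false := by
        rw [PySem.Dict.contains_eq_isSome_get?, hnone2]
        rfl
      refine ⟨steps2 + 2, memo2.insert (u, f) ((pvBFold L fin memo2 u f).1),
        ?_, ?_, ?_, ?_, ?_, ?_, ?_, by omega⟩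
      · intro gas rest
        have h1 : gas + (steps2 + 2) = (((gas + 1) + steps2)) + 1 := by omega
        rw [h1]
        calc loopB L fin ((((gas + 1) + steps2)) + 1) ((u, f) :: rest) memo
            = loopB L fin ((gas + 1) + steps2)
                (((pvKids L u f).filter (fun k => (memo.get? k).isNone)).reverse
                  ++ (u, f) :: rest) memo := by
              simp only [loopB]
              rw [if_neg (by simpa using hhit), if_neg (by simp [h22]), hpend]
          _ = loopB L fin (gas + 1) ((u, f) :: rest) memo2 := heq2 _ _
          _ = loopB L fin gas rest (memo2.insert (u, f) ((pvBFold L fin memo2 u f).1)) := by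
              simp only [loopB]
              rw [if_neg (by simp [hnone2]), if_pos h22b]
      · constructor
        · exact PySem.Dict.nodup_keys_insert _ _ _ hok2.1
        · intro k v hv
          rw [PySem.Dict.get?_insert] at hv
          split_ifs at hv with hk
          · subst hk
            cases hv
            exact ⟨⟨hu0, hun, hf0, hfF, hreach⟩, hval2⟩
          · exact hok2.2 k v hv
      · intro k v hv
        have hk : k ≠ (u, f) := by
          rintro rfl
          rw [hv] at hhit
          simp at hhit
        rw [PySem.Dict.get?_insert, if_neg hk]
        exact hsub2 k v hv
      · rw [PySem.Dict.get?_insert_self]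
        rfl
      · intro k v hv
        rw [PySem.Dict.get?_insert] at hv
        split_ifs at hv with hk
        · subst hk
          exact Or.inr (le_refl _)
        · rcases hnew2 k v hv with h3 | h3
          · exact Or.inl h3
          · exact Or.inr (by omega)
      · rw [PySem.Dict.size_insert, if_neg (by simp [hcont2])]
        omega
      · rw [PySem.Dict.size_insert, if_neg (by simp [hcont2])]
        have hlen : ((pvKids L u f).filter (fun k => (memo.get? k).isNone)).reverse.length
            ≤ L.length := by
          rw [List.length_reverse]
          calc ((pvKids L u f).filter (fun k => (memo.get? k).isNone)).length
              ≤ (pvKids L u f).length := List.length_filter_le _ _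
            _ = ((PySem.List.enumerate L).filter (pvP0 L u f)).length := List.length_map ..
            _ ≤ (PySem.List.enumerate L).length := List.length_filter_le _ _
            _ = L.length := PySem.List.length_enumerate L 0
        have hz : memo2.size + 1 - memo.size = (memo2.size - memo.size) + 1 := by omega
        rw [hz]
        have hd : (2 * L.length + 3) * ((memo2.size - memo.size) + 1)
            = (2 * L.length + 3) * (memo2.size - memo.size) + (2 * L.length + 3) := by ring
        rw [hd]
        omega

lemma pvGas_ge (L : List Int) (fu : Int) (X : Nat) (hX : X ≤ L.length * (fu.toNat + 1)) :
    (2 * L.length + 3) * X + L.length + 4 ≤ pvGas L fu := by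
  unfold pvGas
  have h1 : (2 * L.length + 3) * X ≤ (2 * L.length + 3) * (L.length * (fu.toNat + 1)) :=
    Nat.mul_le_mul_left _ hX
  have h2 : (2 * L.length + 3) * (L.length * (fu.toNat + 1) + 2)
      = (2 * L.length + 3) * (L.length * (fu.toNat + 1)) + (2 * L.length + 3) * 2 := by ring
  omega

lemma pvKids_len (L : List Int) (u f : Int) : (pvKids L u f).length ≤ L.length := by
  calc (pvKids L u f).length
      = ((PySem.List.enumerate L).filter (pvP0 L u f)).length := List.length_map ..
    _ ≤ (PySem.List.enumerate L).length := List.length_filter_le _ _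
    _ = L.length := PySem.List.length_enumerate L 0

lemma countRoutes1_alt_eq_top (L : List Int) (s fin fu : Int)
    (hpre : Pre_countRoutes1 L s fin fu) :
    countRoutes1_alt L s fin fu = pvTop L fin s fu := by
  obtain ⟨hidx, hdisj⟩ := hpre
  have hok0 : pvMemoOK L fin (PySem.List.pyGetD L s 0) fu PySem.Dict.empty :=
    pvMemoOK_empty L fin _ fu
  have hfold := pvBFold_spec L fin PySem.Dict.empty s fu
  have hnone0 : ∀ k : Int × Int, (PySem.Dict.empty : PySem.Dict (Int × Int) Int).get? k = none := by
    intro k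
    simp [pysem]
  unfold countRoutes1_alt
  by_cases hkids : pvKids L s fu = []
  · -- no affordable move from the start: one iteration
    have h22 : (pvBFold L fin PySem.Dict.empty s fu).2.2 = true := by
      rw [hfold, hkids]
      rfl
    obtain ⟨m, hm⟩ : ∃ m, pvGas L fu = m + 1 := ⟨pvGas L fu - 1, by unfold pvGas; omega⟩
    rw [hm]
    simp only [loopB]
    rw [if_neg (by simp [hnone0]), if_pos h22, loopB_nil]
    rw [PySem.Dict.getD_insert]
    rw [if_pos rfl]
    rw [hfold, hkids]
    unfold pvTop
    rw [hkids]
    simp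
  · -- some affordable move: fuel is nonnegative and pvSafe holds
    obtain ⟨k0, hk0⟩ := List.exists_mem_of_ne_nil _ hkids
    have hk0m := pvKids_mem L s fu hk0
    have hfu0 : (0 : Int) ≤ fu := by omega
    have hsafe : pvSafe L (PySem.List.pyGetD L s 0) fu := by
      rcases hdisj with h | h
      · omega
      · exact h
    have hn1 : 1 ≤ L.length := by
      have := hk0m.2.1
      omega
    have hsn : -(L.length : Int) ≤ s ∧ s < (L.length : Int) := by
      apply hidx
      refine ⟨hn1, ?_⟩
      rintro ⟨hl1, hs0⟩
      have h1 := hk0m.1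
      have h2 := hk0m.2.1
      have h3 := hk0m.2.2.1
      rw [hl1] at h2
      rw [hs0] at h3
      omega
    have hroot0 : |PySem.List.pyGetD L s 0 - PySem.List.pyGetD L s 0| ≤ fu - fu := by
      simp
    have hA : (PySem.Dict.empty : PySem.Dict (Int × Int) Int).size = 0 := rfl
    by_cases hs0 : 0 ≤ s
    · -- canonical start: resolve (s, fu) directly
      obtain ⟨steps, memo', heq, hok', hsub, hsome, hnew, hszm, hstep, -⟩ :=
        pvResolve L fin (PySem.List.pyGetD L s 0) fu hsafe fu.toNat s fu (le_refl _)
          ⟨hs0, hsn.2, hfu0, le_refl fu, hroot0⟩ PySem.Dict.empty hok0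
      have hsize' := pvMemoOK_size L fin _ fu memo' hok'
      have hge := pvGas_ge L fu memo'.size hsize'
      rw [hA, Nat.sub_zero] at hstep
      have hsplit : pvGas L fu = (pvGas L fu - steps) + steps := by omega
      rw [hsplit, heq (pvGas L fu - steps) [], loopB_nil]
      obtain ⟨v, hv⟩ := Option.isSome_iff_exists.mp hsome
      have hgd : memo'.getD (s, fu) 0 = v := by
        rw [PySem.Dict.getD_eq_get?_getD, hv]
        rfl
      rw [hgd, (hok'.2 _ _ hv).2]
      exact (pvTop_eq_pvG L (PySem.List.pyGetD L s 0) fu fin s fu hsafe hs0 hsn.2 hfu0 hroot0).symm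
    · -- negative (wrapped) start: resolve the children first, then redo the root
      push_neg at hs0
      have h22 : (pvBFold L fin PySem.Dict.empty s fu).2.2 = false := by
        rw [hfold]
        cases hk : pvKids L s fu with
        | nil => exact absurd hk hkids
        | cons a tl => simp [hnone0]
      have hpend0 : (pvBFold L fin PySem.Dict.empty s fu).2.1 = pvKids L s fu := by
        rw [hfold]
        apply List.filter_eq_self.mpr
        intro k hk
        simp [hnone0]
      have hcs : ∀ c ∈ (pvKids L s fu).reverse,
          c.2.toNat ≤ fu.toNat ∧ pvState L (PySem.List.pyGetD L s 0) fu c ∧ c.2 ≤ fu := by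
        intro c hc
        rw [List.mem_reverse] at hc
        have hm := pvKids_mem L s fu hc
        have hr := pvKids_reach L (PySem.List.pyGetD L s 0) fu s fu hroot0 c hc
        exact ⟨by omega, ⟨hm.1, hm.2.1, hm.2.2.2.1, hm.2.2.2.2, hr⟩, hm.2.2.2.2⟩
      obtain ⟨steps2, memo2, heq2, hok2, hsub2, hsome2, hnew2, hsz2, hstep2⟩ :=
        pvResolveList L fin (PySem.List.pyGetD L s 0) fu fu fu.toNat
          (fun u' f' hf' hs' =>
            pvResolve L fin (PySem.List.pyGetD L s 0) fu hsafe fu.toNat u' f' hf' hs')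
          (pvKids L s fu).reverse hcs PySem.Dict.empty hok0
      have hnone2 : memo2.get? (s, fu) = none := by
        rcases h2 : memo2.get? (s, fu) with _ | v
        · rfl
        · have h3 : (0 : Int) ≤ s := (hok2.2 _ _ h2).1.1
          omega
      have hall2 : ∀ k ∈ pvKids L s fu, (memo2.get? k).isSome = true := by
        intro k hk
        exact hsome2 k (List.mem_reverse.mpr hk)
      have hfold2 := pvBFold_spec L fin memo2 s fu
      have hval2 : (pvBFold L fin memo2 s fu).1 = pvTop L fin s fu := by
        rw [hfold2]
        exact pvTotal_eq0 L fin s fu memo2 (fun k v hv => (hok2.2 k v hv).2) hall2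
      have h22b : (pvBFold L fin memo2 s fu).2.2 = true := by
        rw [hfold2]
        exact List.all_eq_true.mpr hall2
      have hsize2 := pvMemoOK_size L fin _ fu memo2 hok2
      have hge := pvGas_ge L fu memo2.size hsize2
      have hlenk : (pvKids L s fu).reverse.length ≤ L.length := by
        rw [List.length_reverse]
        exact pvKids_len L s fu
      rw [hA, Nat.sub_zero] at hstep2
      obtain ⟨m, hm⟩ : ∃ m, pvGas L fu = (m + 1) + steps2 + 1 :=
        ⟨pvGas L fu - steps2 - 2, by omega⟩
      rw [hm]
      simp only [loopB]
      rw [if_neg (by simp [hnone0]), if_neg (by simp [h22]), hpend0]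
      rw [heq2 (m + 1) [(s, fu)]]
      simp only [loopB]
      rw [if_neg (by simp [hnone2]), if_pos h22b, loopB_nil]
      rw [PySem.Dict.getD_insert, if_pos rfl, hval2]

-- ===== VERDICT (by name: the statement is the Claim_ definition above) =====
theorem countRoutes1_spec : Claim_equal_countRoutes1 := by
  intro locations start finish fuel _ hpre
  unfold Spec_countRoutes1
  rw [countRoutes1_eq_top, countRoutes1_alt_eq_top locations start finish fuel hpre]
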